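-- pv_equiv track=rewrite | github.com/david-uni/python-help | homeworks/ex2/ex2_version_2.py | match_str_to_length
-- ===== SOURCE A (Python) =====
-- def match_str_to_length(string, length):
--     accumulator = ''
--     for char in list(string):
--         if len(accumulator) == 0 or accumulator[-1] == char:
--             accumulator += char
--         else:
--             accumulator = char
--         if len(accumulator) == length:
--             return f'For length {length}, found the substring {accumulator}!'
--     return f'Didn\'t find a substring of length {length}'
-- ===== SOURCE B (Python) =====
-- def match_str_to_length(string, length):
--     if length >= 1:
--         i, n = 0, len(string)
--         while i < n:
--             j = i
--             while j < n and string[j] == string[i]: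
--                 j += 1
--             if j - i >= length:
--                 return f'For length {length}, found the substring {string[i] * length}!'
--             i = j
--     return f"Didn't find a substring of length {length}"
-- ===== Notes on version B (the rewrite author's own statement) =====
-- stated objective: alternative
-- what changed: B decomposes the string into maximal runs of identical characters (two-pointer run scan, checking each run's total length once) instead of A's per-character accumulator rebuild, and guards length>=1 up front.
import Mathlib
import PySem

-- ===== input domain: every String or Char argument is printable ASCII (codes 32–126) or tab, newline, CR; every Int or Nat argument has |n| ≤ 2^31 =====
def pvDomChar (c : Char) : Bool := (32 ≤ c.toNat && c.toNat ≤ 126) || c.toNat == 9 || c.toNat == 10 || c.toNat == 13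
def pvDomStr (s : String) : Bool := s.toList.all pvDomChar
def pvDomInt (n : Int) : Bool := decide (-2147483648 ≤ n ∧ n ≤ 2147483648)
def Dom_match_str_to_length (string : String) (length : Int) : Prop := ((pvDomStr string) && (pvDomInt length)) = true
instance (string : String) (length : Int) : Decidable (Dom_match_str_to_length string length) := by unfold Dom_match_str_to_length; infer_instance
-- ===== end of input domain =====

-- B replaces A's per-character accumulator rebuild with a maximal-run scan (equal cost; alternative decomposition).


-- ===== PORT A =====
-- the 'for char in list(string)' loop carrying the accumulator (a List Char)
def pvLoopA (length : Int) : List Char → List Char → String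
  | _,   [] => "Didn't find a substring of length " ++ PySem.Int.toStr length
  | acc, c :: cs =>
    let acc' := if acc = [] ∨ acc.getLast? = some c then acc ++ [c] else [c]
    if (acc'.length : Int) = length then
      "For length " ++ PySem.Int.toStr length ++ ", found the substring " ++ String.mk acc' ++ "!"
    else
      pvLoopA length acc' cs

def match_str_to_length (string : String) (length : Int) : String :=
  pvLoopA length [] string.toList

-- ===== PORT B =====
-- inner+outer while of Source B: extend the current run of c (count n), check the run's total length when it ends
def pvRunB (length : Int) (c : Char) (n : Nat) : List Char → String
  | [] => if length ≤ (n : Int) then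
            "For length " ++ PySem.Int.toStr length ++ ", found the substring " ++
              String.mk (List.replicate length.toNat c) ++ "!"
          else "Didn't find a substring of length " ++ PySem.Int.toStr length
  | d :: cs =>
    if d = c then pvRunB length c (n + 1) cs
    else if length ≤ (n : Int) then
      "For length " ++ PySem.Int.toStr length ++ ", found the substring " ++
        String.mk (List.replicate length.toNat c) ++ "!"
    else pvRunB length d 1 cs

def match_str_to_length_alt (string : String) (length : Int) : String :=
  if 1 ≤ length then
    match string.toList with
    | [] => "Didn't find a substring of length " ++ PySem.Int.toStr length
    | c :: cs => pvRunB length c 1 cs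
  else "Didn't find a substring of length " ++ PySem.Int.toStr length

-- ===== PRECONDITION & SPEC =====
def Spec_match_str_to_length (string : String) (length : Int) (out : String) : Prop := out = match_str_to_length_alt string length
instance (string : String) (length : Int) (out : String) : Decidable (Spec_match_str_to_length string length out) := by unfold Spec_match_str_to_length; infer_instance

-- ===== CLAIM (what is proved, stated in full; the proofs are below) =====
def Claim_equal_match_str_to_length : Prop := ∀ (string : String) (length : Int), Dom_match_str_to_length string length → Spec_match_str_to_length string length (match_str_to_length string length)

-- ===== LEMMAS AND PROOFS =====

-- A never matches when length <= 0 (the accumulator is never empty after the update)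
lemma pvLoopA_nonpos (length : Int) (hl : length ≤ 0) :
    ∀ cs acc, pvLoopA length acc cs =
      "Didn't find a substring of length " ++ PySem.Int.toStr length := by
  intro cs
  induction cs with
  | nil => intro acc; simp [pvLoopA]
  | cons c cs ih =>
    intro acc
    simp only [pvLoopA]
    have hlen : 1 ≤ (if acc = [] ∨ acc.getLast? = some c then acc ++ [c] else [c]).length := by
      split <;> simp
    rw [if_neg (by omega)]
    exact ih _

lemma getLast?_replicate_pos (k : Nat) (c : Char) (hk : 1 ≤ k) :
    (List.replicate k c).getLast? = some c := by
  cases k with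
  | zero => omega
  | succ n => simp [List.getLast?_replicate]

-- once the run already has >= length characters, B reports the match for this run
lemma pvRunB_found (l : Nat) : ∀ (cs : List Char) (c : Char) (k : Nat), l ≤ k →
    pvRunB (l : Int) c k cs =
      "For length " ++ PySem.Int.toStr (l : Int) ++ ", found the substring " ++
        String.mk (List.replicate ((l : Int)).toNat c) ++ "!" := by
  intro cs
  induction cs with
  | nil => intro c k hk; simp only [pvRunB]; rw [if_pos (by omega)]
  | cons d cs ih =>
    intro c k hk
    simp only [pvRunB]
    split
    · exact ih c (k + 1) (by omega)
    · rw [if_pos (by omega)]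

-- main invariant: A's accumulator is replicate k c with 1 <= k < l, matching B's run counter
lemma pv_main (l : Nat) (hl : 1 ≤ l) :
    ∀ (cs : List Char) (c : Char) (k : Nat), 1 ≤ k → k < l →
      pvLoopA (l : Int) (List.replicate k c) cs = pvRunB (l : Int) c k cs := by
  intro cs
  induction cs with
  | nil =>
    intro c k hk hkl
    simp only [pvLoopA, pvRunB]
    rw [if_neg (by omega)]
  | cons d cs ih =>
    intro c k hk hkl
    have hlast := getLast?_replicate_pos k c hk
    by_cases hdc : d = c
    · subst hdc
      simp only [pvLoopA, pvRunB, hlast, or_true, if_true]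
      rw [← List.replicate_succ' (n := k), List.length_replicate]
      by_cases hfin : k + 1 = l
      · subst hfin
        rw [if_pos rfl, pvRunB_found (k + 1) cs d (k + 1) (by omega)]
        simp
      · rw [if_neg (by omega)]
        exact ih d (k + 1) (by omega) (by omega)
    · have hcond : ¬ (List.replicate k c = [] ∨ (List.replicate k c).getLast? = some d) := by
        rw [hlast]
        push Not
        exact ⟨by simp; omega, by simpa using fun h => hdc h.symm⟩
      simp only [pvLoopA, pvRunB, if_neg hcond, if_neg (fun h => hdc h),
        List.length_cons, List.length_nil]
      rw [if_neg (by omega), if_neg (by omega)]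
      have h1 : [d] = List.replicate 1 d := by simp
      rw [h1]
      exact ih d 1 (by omega) (by omega)

-- ===== VERDICT (by name: the statement is the Claim_ definition above) =====
theorem match_str_to_length_spec : Claim_equal_match_str_to_length := by
  intro string length _
  unfold Spec_match_str_to_length match_str_to_length match_str_to_length_alt
  by_cases hpos : 1 ≤ length
  · obtain ⟨l, rfl⟩ : ∃ l : Nat, length = (l : Int) :=
      ⟨length.toNat, (Int.toNat_of_nonneg (by omega)).symm⟩
    have hl : 1 ≤ l := by exact_mod_cast hpos
    rw [if_pos hpos]
    cases hsl : string.toList with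
    | nil => simp [pvLoopA]
    | cons c cs =>
      simp only [pvLoopA, List.nil_append, ite_self, List.length_cons, List.length_nil]
      by_cases h1 : l = 1
      · subst h1
        rw [if_pos (by omega), pvRunB_found 1 cs c 1 (by omega)]
        simp
      · rw [if_neg (by omega)]
        have h2 : [c] = List.replicate 1 c := by simp
        rw [h2]
        exact pv_main l hl cs c 1 (by omega) (by omega)
  · rw [if_neg hpos, pvLoopA_nonpos length (by omega) _ _]
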